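-- pv_equiv track=rewrite | github.com/farzana039/Daily-Coding- | Reverse and Remove Duplicates/Reverse and Remove duplicates from string.py | reverse_and_remove_duplicates
-- ===== SOURCE A (Python) =====
-- def reverse_and_remove_duplicates(s):
--     seen = set()  # To track unique characters
--     result = []   # To store the reversed string without duplicates and spaces
--     # Traverse the string from the end
--     for char in reversed(s):
--         if char != ' ' and char not in seen:  # Ignore spaces and duplicates
--             result.append(char)
--             seen.add(char)
--     return ''.join(result)
-- ===== SOURCE B (Python) =====
-- def reverse_and_remove_duplicates(s):
--     # Forward scan keeping each non-space char at its LAST occurrence, then reverse.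
--     out = []
--     rest = s
--     while rest:
--         c, rest = rest[0], rest[1:]
--         if c != ' ' and c not in rest:
--             out.append(c)
--     return ''.join(reversed(out))
-- ===== Notes on version B (the rewrite author's own statement) =====
-- stated objective: alternative
-- what changed: Replaces the reversed-traversal with a seen-set by a forward scan that keeps each non-space character exactly at its last occurrence (membership lookahead into the remaining suffix) and reverses the collected list at the end.
import Mathlib
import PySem

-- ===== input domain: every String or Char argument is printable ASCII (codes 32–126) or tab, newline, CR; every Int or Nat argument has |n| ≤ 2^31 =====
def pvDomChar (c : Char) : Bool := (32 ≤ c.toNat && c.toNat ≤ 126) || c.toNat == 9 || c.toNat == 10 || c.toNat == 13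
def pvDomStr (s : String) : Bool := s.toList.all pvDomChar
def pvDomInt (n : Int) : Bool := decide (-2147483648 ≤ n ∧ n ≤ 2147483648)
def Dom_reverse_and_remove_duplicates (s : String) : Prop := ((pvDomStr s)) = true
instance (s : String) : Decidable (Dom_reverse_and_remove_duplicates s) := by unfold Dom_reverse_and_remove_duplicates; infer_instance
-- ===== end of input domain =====

-- B forward-scans, keeping each non-space char at its last occurrence, then reverses; alternative decomposition, not faster.

-- ===== PORT A =====
def reverse_and_remove_duplicates (s : String) : String :=
  String.ofList
    (s.toList.reverse.foldl
      (fun (acc : PySem.Set Char × List Char) char =>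
        if char ≠ ' ' ∧ PySem.Set.contains acc.1 char = false then
          (PySem.Set.add acc.1 char, acc.2 ++ [char])
        else acc)
      (PySem.Set.empty, [])).2

-- ===== PORT B =====
-- the while loop of Source B: examine the head, look ahead into the remainder
def keptLast : List Char → List Char
  | [] => []
  | c :: rest => if c ≠ ' ' ∧ c ∉ rest then c :: keptLast rest else keptLast rest

def reverse_and_remove_duplicates_alt (s : String) : String :=
  String.ofList (keptLast s.toList).reverse

-- ===== PRECONDITION & SPEC =====
def Spec_reverse_and_remove_duplicates (s : String) (out : String) : Prop := out = reverse_and_remove_duplicates_alt s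
instance (s : String) (out : String) : Decidable (Spec_reverse_and_remove_duplicates s out) := by unfold Spec_reverse_and_remove_duplicates; infer_instance

-- ===== CLAIM (what is proved, stated in full; the proofs are below) =====
def Claim_equal_reverse_and_remove_duplicates : Prop := ∀ (s : String), Dom_reverse_and_remove_duplicates s → Spec_reverse_and_remove_duplicates s (reverse_and_remove_duplicates s)

-- ===== LEMMAS AND PROOFS =====

-- first occurrences (skipping spaces) of r, with chars of `seen` already excluded: A's loop, seen as a list
def foRev : List Char → List Char → List Char
  | [], _ => []
  | c :: r, seen => if c ≠ ' ' ∧ c ∉ seen then c :: foRev r (c :: seen) else foRev r seen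

-- B's keep-last filter, with an extra virtual suffix F excluded
def keptF : List Char → List Char → List Char
  | [], _ => []
  | c :: t, F => if c ≠ ' ' ∧ c ∉ t ∧ c ∉ F then c :: keptF t F else keptF t F

theorem foRev_congr : ∀ (r F F' : List Char), (∀ d, d ∈ F ↔ d ∈ F') → foRev r F = foRev r F'
  | [], _, _, _ => rfl
  | c :: r, F, F', h => by
    simp only [foRev, h c]
    split_ifs with hc
    · rw [foRev_congr r (c :: F) (c :: F') (by intro d; simp [h d])]
    · rw [foRev_congr r F F' h]

theorem foRev_drop (r : List Char) (c : Char) (F : List Char) (h : c = ' ' ∨ c ∈ F) :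
    foRev r (c :: F) = foRev r F := by
  induction r generalizing F with
  | nil => rfl
  | cons d r ih =>
    have hcond : (d ≠ ' ' ∧ d ∉ c :: F) ↔ (d ≠ ' ' ∧ d ∉ F) := by
      constructor
      · rintro ⟨h1, h2⟩; exact ⟨h1, fun hd => h2 (List.mem_cons_of_mem _ hd)⟩
      · rintro ⟨h1, h2⟩
        refine ⟨h1, fun hd => ?_⟩
        rcases List.mem_cons.mp hd with rfl | hd
        · rcases h with h | h
          · exact h1 h
          · exact h2 h
        · exact h2 hd
    simp only [foRev, hcond]
    split_ifs with hc
    · rw [foRev_congr r (d :: c :: F) (c :: d :: F) (by intro x; simp; tauto),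
        ih (d :: F) (by rcases h with h | h <;> simp [h])]
    · exact ih F h

theorem keptF_append (l : List Char) (c : Char) (F : List Char) :
    keptF (l ++ [c]) F = keptF l (c :: F) ++ (if c ≠ ' ' ∧ c ∉ F then [c] else []) := by
  induction l with
  | nil => simp only [List.nil_append, keptF]; split_ifs <;> simp_all
  | cons d t ih =>
    have hcond : (d ≠ ' ' ∧ d ∉ t ++ [c] ∧ d ∉ F) ↔ (d ≠ ' ' ∧ d ∉ t ∧ d ∉ c :: F) := by
      simp [List.mem_append, List.mem_cons]; tauto
    simp only [List.cons_append, keptF, hcond, ih]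
    split_ifs <;> simp

theorem foRev_eq_keptF (l : List Char) : ∀ F, foRev l.reverse F = (keptF l F).reverse := by
  induction l using List.reverseRecOn with
  | nil => intro F; rfl
  | append_singleton l' c ih =>
    intro F
    rw [keptF_append, List.reverse_append, List.reverse_append]
    simp only [List.reverse_singleton, List.singleton_append, foRev]
    split_ifs with hc
    · simp [ih (c :: F)]
    · rw [← foRev_drop l'.reverse c F (by tauto), ih (c :: F)]
      simp

theorem keptLast_eq_keptF (l : List Char) : keptLast l = keptF l [] := by
  induction l with
  | nil => rfl
  | cons c t ih => simp only [keptLast, keptF, List.not_mem_nil, not_false_iff, and_true, ih]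

theorem foldA (r : List Char) : ∀ (S : PySem.Set Char) (res : List Char),
    (r.foldl
      (fun (acc : PySem.Set Char × List Char) char =>
        if char ≠ ' ' ∧ PySem.Set.contains acc.1 char = false then
          (PySem.Set.add acc.1 char, acc.2 ++ [char])
        else acc)
      (S, res)).2 = res ++ foRev r S := by
  induction r with
  | nil => intro S res; simp [foRev]
  | cons c r ih =>
    intro S res
    have hcont : (c ≠ ' ' ∧ PySem.Set.contains S c = false) ↔ (c ≠ ' ' ∧ c ∉ S) := by
      simp [PySem.Set.contains]
    simp only [List.foldl_cons, foRev]
    by_cases hc : c ≠ ' ' ∧ c ∉ S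
    · rw [if_pos (hcont.mpr hc), if_pos hc, ih,
        foRev_congr r (PySem.Set.add S c) (c :: S)
          (by intro d; simp [PySem.Set.mem_add, List.mem_cons]; tauto)]
      simp
    · rw [if_neg (fun h => hc (hcont.mp h)), if_neg hc]
      exact ih S res

-- ===== VERDICT (by name: the statement is the Claim_ definition above) =====
theorem reverse_and_remove_duplicates_spec : Claim_equal_reverse_and_remove_duplicates := by
  intro s _
  unfold Spec_reverse_and_remove_duplicates reverse_and_remove_duplicates reverse_and_remove_duplicates_alt
  rw [foldA, keptLast_eq_keptF, ← foRev_eq_keptF]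
  rfl
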